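-- pv_equiv track=rewrite | github.com/AuthEceSoftEng/thesis-big-softeng-data | events-to-cassandra-dockerized-system/flask-events-dashboard/server.py | seconds_to_period
-- ===== SOURCE A (Python) =====
-- def seconds_to_period(num_of_seconds):
--         """
--         :param num_of_seconds: number of seconds to convert to higher time durations (years, months, etc)
--         :return time_dict_keep_largest_two_non_zero_durations: The first two largest time durations that the seconds are converted into:
--
--         Example:
--         For input num_of_seconds = 168039959, we get
--         output: time_dict_keep_largest_two_non_zero_durations = {'years': 5, 'months': 3}
--         """
--         seconds_in_a_year = 365*24*60*60
--         seconds_in_a_month = 30*24*60*60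
--         seconds_in_a_day = 24*60*60
--         seconds_in_an_hour = 60*60
--         seconds_in_a_minute = 60
--
--         years, remaining_seconds = divmod(num_of_seconds, seconds_in_a_year)
--         months, remaining_seconds = divmod(remaining_seconds, seconds_in_a_month)
--         days, remaining_seconds = divmod(remaining_seconds, seconds_in_a_day)
--         hours, remaining_seconds = divmod(remaining_seconds, seconds_in_an_hour)
--         minutes, remaining_seconds = divmod(remaining_seconds, seconds_in_a_minute)
--         seconds = remaining_seconds
--
--         time_dict = {'year(s)': years, 'month(s)': months, 'day(s)':days, \
--             'hour(s)':hours, 'minute(s)':minutes, 'second(s)':seconds}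
--
--         time_dict_keep_largest_two_non_zero_durations = {}
--
--         # Iterate through the ordered time dictionary
--         for k, v, in time_dict.items():
--             if time_dict[k] != 0:
--                 time_dict_keep_largest_two_non_zero_durations[k] = int(v)
--             # Keep only 2 of the values in the time period
--             if len(time_dict_keep_largest_two_non_zero_durations.items()) == 2:
--                 break
--
--         if time_dict_keep_largest_two_non_zero_durations == {}:
--             return {'second(s)': 0}
--
--         return time_dict_keep_largest_two_non_zero_durations
-- ===== SOURCE B (Python) =====
-- _UNITS = [('year(s)', 31536000), ('month(s)', 2592000), ('day(s)', 86400),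
--           ('hour(s)', 3600), ('minute(s)', 60), ('second(s)', 1)]
--
--
-- def _first_nonzero_unit(value, units):
--     # First unit whose floor-quotient of value is non-zero.  This is sound
--     # because a zero quotient leaves the value unchanged: divmod(v, s) == (0, v).
--     for i, (name, size) in enumerate(units):
--         q = value // size
--         if q != 0:
--             return name, int(q), value % size, units[i + 1:]
--     return None
--
--
-- def seconds_to_period(num_of_seconds):
--     first = _first_nonzero_unit(num_of_seconds, _UNITS)
--     if first is None:
--         return {'second(s)': 0}
--     name1, q1, remainder, rest = first
--     second = _first_nonzero_unit(remainder, rest)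
--     if second is None:
--         return {name1: q1}
--     name2, q2, _, _ = second
--     return {name1: q1, name2: q2}
-- ===== Notes on version B (the rewrite author's own statement) =====
-- stated objective: alternative
-- what changed: Instead of A's full six-step cascading divmod decomposition followed by a dict-filtering/truncation loop, B searches for the largest unit with a non-zero floor-quotient (sound since a zero quotient leaves the value unchanged), takes its remainder, and searches the remaining units once more for the second entry, computing only the two needed divisions and building no intermediate dict.
import Mathlib
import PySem

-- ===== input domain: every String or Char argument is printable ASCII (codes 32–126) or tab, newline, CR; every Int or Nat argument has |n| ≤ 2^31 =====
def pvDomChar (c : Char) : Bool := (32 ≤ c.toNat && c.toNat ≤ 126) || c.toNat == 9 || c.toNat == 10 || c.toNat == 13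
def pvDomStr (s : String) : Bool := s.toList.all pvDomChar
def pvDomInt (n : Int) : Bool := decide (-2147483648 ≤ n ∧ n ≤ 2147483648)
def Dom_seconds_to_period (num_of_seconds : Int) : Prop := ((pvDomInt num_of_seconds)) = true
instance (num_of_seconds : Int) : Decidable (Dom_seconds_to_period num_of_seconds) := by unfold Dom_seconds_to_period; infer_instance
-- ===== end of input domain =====

-- B replaces A's six-step cascading divmod plus a dict-filtering/truncation loop by two searches:
-- find the largest unit with non-zero floor-quotient, then search the remaining units on the
-- remainder for the second entry (objective: alternative algorithm, same cost).

-- ===== PORT A =====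
-- A's selection loop over time_dict.items(); the key k always comes from time_dict itself,
-- so Python's time_dict[k] never raises and getD _ 0 is exact here; int(v) = v on Int.
def aSelect (td : PySem.Dict String Int) : List (String × Int) → PySem.Dict String Int → PySem.Dict String Int
  | [], acc => acc
  | (k, v) :: rest, acc =>
    let acc' := if td.getD k 0 ≠ 0 then acc.insert k v else acc
    if acc'.items.length = 2 then acc' else aSelect td rest acc'

def seconds_to_period (num_of_seconds : Int) : List (String × Int) :=
  let years := PySem.Int.floordiv num_of_seconds 31536000
  let r1 := PySem.Int.mod num_of_seconds 31536000
  let months := PySem.Int.floordiv r1 2592000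
  let r2 := PySem.Int.mod r1 2592000
  let days := PySem.Int.floordiv r2 86400
  let r3 := PySem.Int.mod r2 86400
  let hours := PySem.Int.floordiv r3 3600
  let r4 := PySem.Int.mod r3 3600
  let minutes := PySem.Int.floordiv r4 60
  let seconds := PySem.Int.mod r4 60
  let time_dict : PySem.Dict String Int := PySem.Dict.ofList
    [("year(s)", years), ("month(s)", months), ("day(s)", days),
     ("hour(s)", hours), ("minute(s)", minutes), ("second(s)", seconds)]
  let res := aSelect time_dict time_dict.items PySem.Dict.empty
  if res.items = [] then [("second(s)", 0)] else res.items

-- ===== PORT B =====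
-- Source B's _first_nonzero_unit: scan for the first unit with non-zero floor-quotient;
-- returns (name, quotient, remainder, units after it).
def firstNonzeroUnit : Int → List (String × Int) → Option (String × Int × Int × List (String × Int))
  | _, [] => none
  | v, (name, size) :: rest =>
    let q := PySem.Int.floordiv v size
    if q ≠ 0 then some (name, q, PySem.Int.mod v size, rest)
    else firstNonzeroUnit v rest

def bUnits : List (String × Int) :=
  [("year(s)", 31536000), ("month(s)", 2592000), ("day(s)", 86400),
   ("hour(s)", 3600), ("minute(s)", 60), ("second(s)", 1)]

def seconds_to_period_alt (num_of_seconds : Int) : List (String × Int) :=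
  match firstNonzeroUnit num_of_seconds bUnits with
  | none => [("second(s)", 0)]
  | some (name1, q1, remainder, rest) =>
    match firstNonzeroUnit remainder rest with
    | none => [(name1, q1)]
    | some (name2, q2, _, _) => [(name1, q1), (name2, q2)]

-- ===== PRECONDITION & SPEC =====
def Spec_seconds_to_period (num_of_seconds : Int) (out : List (String × Int)) : Prop := out = seconds_to_period_alt num_of_seconds
instance (num_of_seconds : Int) (out : List (String × Int)) : Decidable (Spec_seconds_to_period num_of_seconds out) := by unfold Spec_seconds_to_period; infer_instance

-- ===== CLAIM (what is proved, stated in full; the proofs are below) =====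
def Claim_equal_seconds_to_period : Prop := ∀ (num_of_seconds : Int), Dom_seconds_to_period num_of_seconds → Spec_seconds_to_period num_of_seconds (seconds_to_period num_of_seconds)

-- ===== LEMMAS AND PROOFS =====

-- common shape of A's selection loop: walk a (name, value) list, insert non-zero values, stop at two entries
def gsel : List (String × Int) → PySem.Dict String Int → PySem.Dict String Int
  | [], acc => acc
  | (k, v) :: rest, acc =>
    let acc' := if v ≠ 0 then acc.insert k v else acc
    if acc'.items.length = 2 then acc' else gsel rest acc'

-- the (name, quotient) list A's divmod cascade produces from a (name, size) table
def qlist : Int → List (String × Int) → List (String × Int)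
  | _, [] => []
  | rem, (nm, sz) :: rest => (nm, PySem.Int.floordiv rem sz) :: qlist (PySem.Int.mod rem sz) rest

theorem aSelect_eq_gsel (td : PySem.Dict String Int) :
    ∀ (l : List (String × Int)) (acc : PySem.Dict String Int),
      (∀ p ∈ l, td.getD p.1 0 = p.2) → aSelect td l acc = gsel l acc := by
  intro l
  induction l with
  | nil => intro acc _; rfl
  | cons p rest ih =>
    intro acc h
    obtain ⟨k, v⟩ := p
    have hk : td.getD k 0 = v := h (k, v) (by simp)
    simp only [aSelect, gsel, hk]
    split <;> split
    · rfl
    · exact ih _ (fun p hp => h p (List.mem_cons_of_mem _ hp))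
    · rfl
    · exact ih _ (fun p hp => h p (List.mem_cons_of_mem _ hp))

-- a zero floor-quotient leaves the value whole: divmod(v, s) = (0, v)
theorem mod_eq_self_of_floordiv_zero (v s : Int) (h : PySem.Int.floordiv v s = 0) :
    PySem.Int.mod v s = v := by
  have := PySem.Int.floordiv_mul_add_mod v s
  rw [h] at this
  omega

theorem fn_none (l : List (String × Int)) :
    ∀ (v : Int), firstNonzeroUnit v l = none → ∀ p ∈ qlist v l, p.2 = 0 := by
  induction l with
  | nil => intro v _ p hp; simp [qlist] at hp
  | cons u rest ih =>
    intro v h p hp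
    obtain ⟨nm, sz⟩ := u
    simp only [firstNonzeroUnit] at h
    by_cases hq : PySem.Int.floordiv v sz = 0
    · rw [if_neg (by simpa using hq)] at h
      simp only [qlist, mod_eq_self_of_floordiv_zero v sz hq, List.mem_cons] at hp
      rcases hp with hp | hp
      · rw [hp]; exact hq
      · exact ih v h p hp
    · rw [if_pos hq] at h
      exact absurd h (by simp)

theorem fn_some (l : List (String × Int)) :
    ∀ (v : Int) (k : String) (q r : Int) (rest : List (String × Int)),
      firstNonzeroUnit v l = some (k, q, r, rest) →
      q ≠ 0 ∧
      (∃ zs, qlist v l = zs ++ (k, q) :: qlist r rest ∧ ∀ p ∈ zs, p.2 = 0) ∧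
      (∃ pre s0, l = pre ++ (k, s0) :: rest) := by
  induction l with
  | nil => intro v k q r rest h; simp [firstNonzeroUnit] at h
  | cons u tl ih =>
    intro v k q r rest h
    obtain ⟨nm, sz⟩ := u
    simp only [firstNonzeroUnit] at h
    by_cases hq : PySem.Int.floordiv v sz = 0
    · rw [if_neg (by simpa using hq)] at h
      obtain ⟨h1, ⟨zs, h2, h3⟩, ⟨pre, s0, h4⟩⟩ := ih v k q r rest h
      refine ⟨h1, ⟨(nm, 0) :: zs, ?_, ?_⟩, ⟨(nm, sz) :: pre, s0, by rw [h4]; rfl⟩⟩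
      · simp only [qlist, hq, mod_eq_self_of_floordiv_zero v sz hq, h2]; rfl
      · intro p hp
        rcases List.mem_cons.mp hp with hp | hp
        · rw [hp]
        · exact h3 p hp
    · rw [if_pos hq] at h
      have h2 := Option.some.inj h
      simp only [Prod.mk.injEq] at h2
      obtain ⟨hk, hq2, hr, hrest⟩ := h2
      subst hk hq2 hr hrest
      exact ⟨hq, ⟨[], by simp [qlist], by simp⟩, ⟨[], sz, rfl⟩⟩

-- skipping zero entries leaves the accumulator untouched
theorem gsel_zeros (zs : List (String × Int)) :
    ∀ (acc : PySem.Dict String Int), (∀ p ∈ zs, p.2 = 0) → acc.items.length ≤ 1 →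
      ∀ (tl : List (String × Int)), gsel (zs ++ tl) acc = gsel tl acc := by
  induction zs with
  | nil => intro acc _ _ tl; rfl
  | cons p rest ih =>
    intro acc h hlen tl
    obtain ⟨k, v⟩ := p
    have hv : v = 0 := h (k, v) (by simp)
    simp only [List.cons_append, gsel, hv, ne_eq, not_true_eq_false, if_neg, not_false_eq_true]
    have h2 : ¬ acc.items.length = 2 := by omega
    simp only [if_neg h2]
    exact ih acc (fun p hp => h p (List.mem_cons_of_mem _ hp)) hlen tl

theorem gsel_all_zero (l : List (String × Int)) :
    ∀ (acc : PySem.Dict String Int), (∀ p ∈ l, p.2 = 0) → gsel l acc = acc := by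
  induction l with
  | nil => intro acc _; rfl
  | cons p rest ih =>
    intro acc h
    obtain ⟨k, v⟩ := p
    have hv : v = 0 := h (k, v) (by simp)
    simp only [gsel, hv, ne_eq, not_true_eq_false, if_neg, not_false_eq_true]
    split
    · rfl
    · exact ih acc (fun p hp => h p (List.mem_cons_of_mem _ hp))

-- the core equivalence, generic in the unit table (names must be distinct)
theorem sel_eq_search (l : List (String × Int)) (hnd : (l.map Prod.fst).Nodup) (v : Int) :
    (if (gsel (qlist v l) PySem.Dict.empty).items = [] then [("second(s)", (0 : Int))]
     else (gsel (qlist v l) PySem.Dict.empty).items)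
    = (match firstNonzeroUnit v l with
       | none => [("second(s)", (0 : Int))]
       | some (k1, q1, r, rest) =>
         match firstNonzeroUnit r rest with
         | none => [(k1, q1)]
         | some (k2, q2, _, _) => [(k1, q1), (k2, q2)]) := by
  cases hfn : firstNonzeroUnit v l with
  | none =>
    rw [gsel_all_zero _ _ (fn_none l v hfn)]
    rfl
  | some t =>
    obtain ⟨k1, q1, r, rest⟩ := t
    obtain ⟨hq1, ⟨zs, hql, hzs⟩, ⟨pre, s0, hl⟩⟩ := fn_some l v k1 q1 r rest hfn
    rw [hql, gsel_zeros zs PySem.Dict.empty hzs (by simp [PySem.Dict.empty]) _]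
    have hacc1 : (PySem.Dict.empty.insert k1 q1).items = [(k1, q1)] := by
      rw [PySem.Dict.items_insert_of_not_contains _ _ (PySem.Dict.contains_empty k1)]
      simp [PySem.Dict.empty]
    simp only [gsel, hq1, ne_eq, not_false_eq_true, if_true, hacc1]
    norm_num
    cases hfn2 : firstNonzeroUnit r rest with
    | none =>
      rw [gsel_all_zero _ _ (fn_none rest r hfn2), hacc1]
      simp
    | some t2 =>
      obtain ⟨k2, q2, r2, rest2⟩ := t2
      obtain ⟨hq2, ⟨zs2, hql2, hzs2⟩, ⟨pre2, s2, hrest⟩⟩ := fn_some rest r k2 q2 r2 rest2 hfn2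
      have hne : k2 ≠ k1 := by
        subst hrest hl
        simp only [List.map_append, List.map_cons] at hnd
        have := (List.nodup_append.mp hnd).2.1
        simp only [List.nodup_cons, List.mem_append, List.mem_cons, List.mem_map] at this
        intro h; exact this.1 (Or.inr (Or.inl h.symm))
      rw [hql2, gsel_zeros zs2 _ hzs2 (by rw [hacc1]; simp) _]
      have hacc2 : ((PySem.Dict.empty.insert k1 q1).insert k2 q2).items
          = [(k1, q1), (k2, q2)] := by
        rw [PySem.Dict.items_insert_of_not_contains _ _
          (by rw [PySem.Dict.contains_insert]; simp [hne, PySem.Dict.contains_empty]), hacc1]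
        rfl
      simp only [gsel, hq2, ne_eq, not_false_eq_true, if_true, hacc2]
      simp [hacc2]

-- A's six cascade quotients ARE qlist on B's table, and the dict is transparent to lookups
theorem td_items (y mo d h mi s : Int) :
    (PySem.Dict.ofList
      [("year(s)", y), ("month(s)", mo), ("day(s)", d),
       ("hour(s)", h), ("minute(s)", mi), ("second(s)", s)]).items
    = [("year(s)", y), ("month(s)", mo), ("day(s)", d),
       ("hour(s)", h), ("minute(s)", mi), ("second(s)", s)] := rfl

theorem floordiv_one (x : Int) : PySem.Int.floordiv x 1 = x := by
  rw [PySem.Int.floordiv_eq_ediv_of_pos (by norm_num)]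
  exact Int.ediv_one x

-- ===== VERDICT (by name: the statement is the Claim_ definition above) =====
theorem seconds_to_period_spec : Claim_equal_seconds_to_period := by
  intro n _
  unfold Spec_seconds_to_period seconds_to_period seconds_to_period_alt
  dsimp only
  rw [td_items, aSelect_eq_gsel]
  · have hL : qlist n bUnits
        = [("year(s)", PySem.Int.floordiv n 31536000),
           ("month(s)", PySem.Int.floordiv (PySem.Int.mod n 31536000) 2592000),
           ("day(s)", PySem.Int.floordiv (PySem.Int.mod (PySem.Int.mod n 31536000) 2592000) 86400),
           ("hour(s)", PySem.Int.floordiv (PySem.Int.mod (PySem.Int.mod (PySem.Int.mod n 31536000) 2592000) 86400) 3600),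
           ("minute(s)", PySem.Int.floordiv (PySem.Int.mod (PySem.Int.mod (PySem.Int.mod (PySem.Int.mod n 31536000) 2592000) 86400) 3600) 60),
           ("second(s)", PySem.Int.mod (PySem.Int.mod (PySem.Int.mod (PySem.Int.mod (PySem.Int.mod n 31536000) 2592000) 86400) 3600) 60)] := by
      simp only [qlist, bUnits, floordiv_one]
    rw [← hL]
    exact sel_eq_search bUnits (by decide) n
  · intro p hp
    fin_cases hp <;> rfl
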